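-- pv_equiv track=rewrite | github.com/luboblu/Master-Thesis | plot_label_distribution.py | make_colors
-- ===== SOURCE A (Python) =====
-- GROUP_COLORS = {
--     "Promise Status":        "#4472C4",   # 藍
--     "Evidence Status":       "#ED7D31",   # 橘
--     "Evidence Quality":      "#70AD47",   # 綠
--     "Verification Timeline": "#FFC000",   # 黃
-- }
--
-- GROUP_SIZES = [2, 3, 4, 5]   # 每組欄位數（evidence_status 含 N/A 共3項）
--
-- def make_colors(labels):
--     colors = []
--     group_names = list(GROUP_COLORS.keys())
--     gi = 0
--     used = 0
--     for i in range(len(labels)):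
--         if used >= GROUP_SIZES[gi]:
--             gi += 1
--             used = 0
--         colors.append(GROUP_COLORS[group_names[gi]])
--         used += 1
--     return colors
-- ===== SOURCE B (Python) =====
-- GROUP_COLORS = {
--     "Promise Status":        "#4472C4",
--     "Evidence Status":       "#ED7D31",
--     "Evidence Quality":      "#70AD47",
--     "Verification Timeline": "#FFC000",
-- }
--
-- GROUP_SIZES = [2, 3, 4, 5]
--
-- def make_colors(labels):
--     palette = []
--     for name, size in zip(GROUP_COLORS, GROUP_SIZES):
--         palette.extend([GROUP_COLORS[name]] * size)
--     return [palette[i] for i in range(len(labels))]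
-- ===== Notes on version B (the rewrite author's own statement) =====
-- stated objective: simpler
-- what changed: Replaces the group-pointer/used-counter state machine with a precomputed flat 14-entry palette built once from the group sizes, then plain element-wise indexing; on 15 or more labels both implementations raise IndexError, so Pre_ excludes only those.
import Mathlib
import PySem

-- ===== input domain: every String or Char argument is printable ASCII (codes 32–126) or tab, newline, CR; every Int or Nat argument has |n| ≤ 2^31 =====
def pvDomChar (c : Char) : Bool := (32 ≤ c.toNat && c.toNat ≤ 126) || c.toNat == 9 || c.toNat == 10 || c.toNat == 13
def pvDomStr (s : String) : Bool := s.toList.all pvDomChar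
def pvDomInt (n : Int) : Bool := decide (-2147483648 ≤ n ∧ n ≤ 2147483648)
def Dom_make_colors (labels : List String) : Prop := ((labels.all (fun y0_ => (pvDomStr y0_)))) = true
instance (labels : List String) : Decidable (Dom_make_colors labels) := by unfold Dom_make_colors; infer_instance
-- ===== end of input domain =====

-- B replaces A's group-pointer/used-counter state machine by a flat palette built once
-- from the group sizes and plain element-wise indexing (objective: simpler).

-- ===== PORT A =====
def pvGroupColors : PySem.Dict String String := PySem.Dict.ofList
  [("Promise Status", "#4472C4"), ("Evidence Status", "#ED7D31"),
   ("Evidence Quality", "#70AD47"), ("Verification Timeline", "#FFC000")]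

def pvGroupSizes : List Int := [2, 3, 4, 5]

def make_colors (labels : List String) : List String :=
  let group_names := PySem.Dict.keys pvGroupColors
  ((PySem.List.pyRange 0 (labels.length : Int) 1).foldl
    (fun (st : List String × Int × Int) (_i : Int) =>
      let colors := st.1
      let gi := st.2.1
      let used := st.2.2
      -- if used >= GROUP_SIZES[gi]: gi += 1; used = 0   (index in range under Pre_)
      let p := if used ≥ PySem.List.pyGetD pvGroupSizes gi 0 then (gi + 1, (0 : Int)) else (gi, used)
      (colors ++ [PySem.Dict.getD pvGroupColors (PySem.List.pyGetD group_names p.1 "") ""],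
       p.1, p.2 + 1))
    ([], 0, 0)).1

-- ===== PORT B =====
def make_colors_alt (labels : List String) : List String :=
  -- palette: each group's color repeated by its size (14 entries)
  let palette := (List.zip (PySem.Dict.keys pvGroupColors) pvGroupSizes).foldl
    (fun acc p => acc ++ List.replicate p.2.toNat (PySem.Dict.getD pvGroupColors p.1 ""))
    []
  (PySem.List.pyRange 0 (labels.length : Int) 1).map
    (fun i => PySem.List.pyGetD palette i "")   -- palette[i]: in range under Pre_

-- ===== PRECONDITION & SPEC =====
-- Pre_ excludes inputs with more than 14 labels, on which the Python A raises IndexError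
-- (GROUP_SIZES[4]); the Python B raises IndexError there too (palette[14]).
def Pre_make_colors (labels : List String) : Prop := labels.length ≤ 14
instance (labels : List String) : Decidable (Pre_make_colors labels) := by unfold Pre_make_colors; infer_instance
def pvWitness_make_colors : List String := ["Promise 1", "Promise 2", "Evidence 1"]
def Spec_make_colors (labels : List String) (out : List String) : Prop := out = make_colors_alt labels
instance (labels : List String) (out : List String) : Decidable (Spec_make_colors labels out) := by unfold Spec_make_colors; infer_instance

-- ===== CLAIM (what is proved, stated in full; the proofs are below) =====
def Claim_equal_make_colors : Prop := ∀ (labels : List String), Dom_make_colors labels → Pre_make_colors labels → Spec_make_colors labels (make_colors labels)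

-- ===== LEMMAS AND PROOFS =====

-- Both ports depend on `labels` only through its length, so they are (definitionally)
-- functions of `labels.length`; with the length bounded by 14 the claim is a finite check.
def pvACore (n : Nat) : List String := make_colors (List.replicate n "")
def pvBCore (n : Nat) : List String := make_colors_alt (List.replicate n "")

lemma pvA_len (labels : List String) : make_colors labels = pvACore labels.length := by
  simp [make_colors, pvACore]

lemma pvB_len (labels : List String) : make_colors_alt labels = pvBCore labels.length := by
  simp [make_colors_alt, pvBCore]

lemma pvCore_eq (n : Nat) (h : n ≤ 14) : pvACore n = pvBCore n := by
  interval_cases n <;> decide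

-- ===== VERDICT (by name: the statement is the Claim_ definition above) =====
theorem make_colors_spec : Claim_equal_make_colors := by
  intro labels _ hpre
  unfold Spec_make_colors
  rw [pvA_len, pvB_len, pvCore_eq labels.length hpre]
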